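-- pv_equiv track=rewrite | github.com/fangyuan-ksgk/minimind | dataset/multiply_dataset.py | generate_multiplication_line
-- ===== SOURCE A (Python) =====
-- def generate_multiplication_line(num1: int, num2: int, use_cot: bool, reverse_digits: bool) -> str:
--     """Generates a multiplication problem string with optional schoolbook-style Chain-of-Thought."""
--
--     def fmt(n: int, pad_len: int = 0) -> str:
--         """Format a number with optional padding and digit reversal."""
--         s = str(n).zfill(pad_len)
--         return ''.join(s[::-1] if reverse_digits else s)
--
--     question = f"{fmt(num1)} * {fmt(num2)}"
--     final_answer = fmt(num1 * num2)
--
--     if not use_cot: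
--         return f"{question} = <answer> {final_answer}"
--
--     partial_products = [int(d) * num2 for d in str(num1)[::-1]]
--     cot_parts = []
--     current_sum = 0
--
--     pad_len = len(str(num2))
--     cot_parts.append(fmt(partial_products[0], pad_len))
--     current_sum = partial_products[0]
--
--     for i, p_prod in enumerate(partial_products[1:], start=1):
--         step_product = p_prod * (10**i)
--         current_sum += step_product
--         pad_len += 1
--
--         summand = fmt(step_product, pad_len)
--         cot_parts.append(f"{summand} ({fmt(current_sum, pad_len)})" if i < len(partial_products) - 1 else summand)
--
--     return f"{question} = {' + '.join(cot_parts)} = <answer> {final_answer}"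
-- ===== SOURCE B (Python) =====
-- def generate_multiplication_line(num1: int, num2: int, use_cot: bool, reverse_digits: bool) -> str:
--     """Arithmetic closed forms: digit i is num1 // 10**i % 10 and the cumulative value is
--     num1 % 10**(i+1) * num2, so no digit-string parsing, no partial-products list and no
--     running sum/pad accumulators are needed."""
--
--     def fmt(n: int, pad_len: int = 0) -> str:
--         s = str(n).zfill(pad_len)
--         return s[::-1] if reverse_digits else s
--
--     question = f"{fmt(num1)} * {fmt(num2)}"
--     final_answer = fmt(num1 * num2)
--
--     if not use_cot:
--         return f"{question} = <answer> {final_answer}"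
--
--     k = len(str(num1))
--     base = len(str(num2))
--     parts = []
--     for i in range(k):
--         part = fmt(num1 // 10**i % 10 * num2 * 10**i, base + i)
--         if 0 < i < k - 1:
--             part += f" ({fmt(num1 % 10**(i+1) * num2, base + i)})"
--         parts.append(part)
--     return f"{question} = {' + '.join(parts)} = <answer> {final_answer}"
-- ===== Notes on version B (the rewrite author's own statement) =====
-- stated objective: alternative
-- what changed: B replaces A's digit-string parse (int(d) over str(num1)[::-1]), partial-products list and mutating current_sum/pad_len accumulators by pure arithmetic closed forms per index: digit i is num1 // 10**i % 10 and the cumulative value is num1 % 10**(i+1) * num2, formatted in one indexed loop.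
import Mathlib
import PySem

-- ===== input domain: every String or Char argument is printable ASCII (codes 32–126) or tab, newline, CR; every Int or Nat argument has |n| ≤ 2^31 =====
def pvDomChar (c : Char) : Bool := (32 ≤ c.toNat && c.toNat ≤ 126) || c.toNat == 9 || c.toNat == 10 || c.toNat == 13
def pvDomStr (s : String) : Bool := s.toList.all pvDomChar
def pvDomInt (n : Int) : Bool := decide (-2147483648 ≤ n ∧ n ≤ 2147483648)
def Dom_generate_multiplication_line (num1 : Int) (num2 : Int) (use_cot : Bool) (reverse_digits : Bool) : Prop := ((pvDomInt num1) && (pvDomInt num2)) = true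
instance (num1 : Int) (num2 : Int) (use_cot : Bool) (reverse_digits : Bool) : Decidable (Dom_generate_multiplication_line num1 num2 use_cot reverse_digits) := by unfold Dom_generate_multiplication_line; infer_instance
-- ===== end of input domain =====

-- B replaces A's digit-string parse, partial-products list and mutating current_sum/pad_len
-- accumulators by per-index arithmetic closed forms (digit = num1 // 10**i % 10, cumulative =
-- num1 % 10**(i+1) * num2); same output (objective: alternative).


-- ===== PORT A =====
-- fmt(n, pad_len): str(n).zfill(pad_len), chars possibly reversed; ''.join over the chars of a
-- string IS that string, so the join is ported as the string itself. Shared verbatim by A and B.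
def pvFmt (reverse_digits : Bool) (n : Int) (pad_len : Int) : String :=
  let s := PySem.Str.zfill (PySem.Int.toStr n) pad_len
  if reverse_digits then String.mk s.toList.reverse else s

-- int(d) for a digit char; Pre_ guarantees num1 ≥ 0 under use_cot, so d is '0'..'9' and
-- Python's ValueError cannot occur (the `.getD 0` default is never used on admitted inputs)
def pvDigit (d : Char) : Int := (PySem.Int.ofStr? (String.mk [d])).getD 0

-- the for-loop over enumerate(partial_products[1:], start=1), state (cot_parts, current_sum, pad_len)
def pvLoopA (rd : Bool) (n : Int) : List Int → Nat → Int → Int → List String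
  | [], _, _, _ => []
  | p :: t, i, cur, pad =>
    let sp := p * 10 ^ i
    let cur' := cur + sp
    let pad' := pad + 1
    let summand := pvFmt rd sp pad'
    (if (i : Int) < n - 1 then summand ++ " (" ++ pvFmt rd cur' pad' ++ ")" else summand)
      :: pvLoopA rd n t (i + 1) cur' pad'

def generate_multiplication_line (num1 : Int) (num2 : Int) (use_cot : Bool) (reverse_digits : Bool) : String :=
  let question := pvFmt reverse_digits num1 0 ++ " * " ++ pvFmt reverse_digits num2 0
  let final_answer := pvFmt reverse_digits (num1 * num2) 0
  if use_cot = false then question ++ " = <answer> " ++ final_answer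
  else
    -- partial_products = [int(d) * num2 for d in str(num1)[::-1]]  (nonempty: str(n) ≠ "", so
    -- partial_products[0] never raises; ported with headI)
    let pp := ((PySem.Int.toChars num1).reverse).map (fun d => pvDigit d * num2)
    let pad0 : Int := ((PySem.Int.toChars num2).length : Int)
    let cot_parts := pvFmt reverse_digits pp.headI pad0
      :: pvLoopA reverse_digits (pp.length : Int) (pp.drop 1) 1 pp.headI pad0
    question ++ " = " ++ PySem.Str.join " + " cot_parts ++ " = <answer> " ++ final_answer

-- ===== PORT B =====
-- B's loop body: fmt(num1 // 10**i % 10 * num2 * 10**i, base+i), plus the cumulative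
-- parenthetical fmt(num1 % 10**(i+1) * num2, base+i) when 0 < i < k - 1
def pvPartBI (rd : Bool) (num2 base k num1 : Int) (i : Int) : String :=
  pvFmt rd (PySem.Int.mod (PySem.Int.floordiv num1 (10 ^ i.toNat)) 10 * num2 * 10 ^ i.toNat)
      (base + i) ++
    (if 0 < i ∧ i < k - 1 then
        " (" ++ pvFmt rd (PySem.Int.mod num1 (10 ^ (i + 1).toNat) * num2) (base + i) ++ ")"
      else "")

def generate_multiplication_line_alt (num1 : Int) (num2 : Int) (use_cot : Bool) (reverse_digits : Bool) : String :=
  let question := pvFmt reverse_digits num1 0 ++ " * " ++ pvFmt reverse_digits num2 0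
  let final_answer := pvFmt reverse_digits (num1 * num2) 0
  if use_cot = false then question ++ " = <answer> " ++ final_answer
  else
    let k : Int := ((PySem.Int.toChars num1).length : Int)
    let base : Int := ((PySem.Int.toChars num2).length : Int)
    -- for i in range(k): parts.append(pvPartBI ... i)
    let parts := (PySem.List.pyRange 0 k 1).map (pvPartBI reverse_digits num2 base k num1)
    question ++ " = " ++ PySem.Str.join " + " parts ++ " = <answer> " ++ final_answer

-- ===== PRECONDITION & SPEC =====
-- Pre_ excludes use_cot with negative num1: there str(num1)[::-1] ends in '-' and int('-')
-- raises ValueError in A, so A returns no value on those inputs.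
def Pre_generate_multiplication_line (num1 : Int) (num2 : Int) (use_cot : Bool) (reverse_digits : Bool) : Prop :=
  use_cot = true → 0 ≤ num1
instance (num1 : Int) (num2 : Int) (use_cot : Bool) (reverse_digits : Bool) : Decidable (Pre_generate_multiplication_line num1 num2 use_cot reverse_digits) := by unfold Pre_generate_multiplication_line; infer_instance

def pvWitness_generate_multiplication_line : Int × Int × Bool × Bool := (123, 45, true, false)

def Spec_generate_multiplication_line (num1 : Int) (num2 : Int) (use_cot : Bool) (reverse_digits : Bool) (out : String) : Prop := out = generate_multiplication_line_alt num1 num2 use_cot reverse_digits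
instance (num1 : Int) (num2 : Int) (use_cot : Bool) (reverse_digits : Bool) (out : String) : Decidable (Spec_generate_multiplication_line num1 num2 use_cot reverse_digits out) := by unfold Spec_generate_multiplication_line; infer_instance

-- ===== CLAIM (what is proved, stated in full; the proofs are below) =====
def Claim_equal_generate_multiplication_line : Prop := ∀ (num1 : Int) (num2 : Int) (use_cot : Bool) (reverse_digits : Bool), Dom_generate_multiplication_line num1 num2 use_cot reverse_digits → Pre_generate_multiplication_line num1 num2 use_cot reverse_digits → Spec_generate_multiplication_line num1 num2 use_cot reverse_digits (generate_multiplication_line num1 num2 use_cot reverse_digits)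

-- ===== LEMMAS AND PROOFS =====

-- digit i of m in base 10, as an Int
def pvDj (m j : Nat) : Int := ((m / 10 ^ j % 10 : Nat) : Int)

-- B's i-th cot part, with a Nat index (proof-side normal form of pvPartBI)
def pvPartB (rd : Bool) (num2 base : Int) (k m i : Nat) : String :=
  pvFmt rd (pvDj m i * num2 * 10 ^ i) (base + (i : Int)) ++
    (if 0 < i ∧ (i : Int) < (k : Int) - 1 then
        " (" ++ pvFmt rd (((m % 10 ^ (i + 1) : Nat) : Int) * num2) (base + (i : Int)) ++ ")"
      else "")

lemma pv_digitChar (d : Nat) (h : d < 10) : pvDigit (Nat.digitChar d) = (d : Int) := by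
  interval_cases d <;> decide

lemma pv_core : ∀ n, 0 < n → ∀ fuel acc, n < fuel →
    Nat.toDigitsCore 10 fuel n acc = ((Nat.digits 10 n).map Nat.digitChar).reverse ++ acc := by
  intro n
  induction n using Nat.strong_induction_on with
  | _ n ih =>
    intro hn fuel acc hf
    match fuel, hf with
    | fuel + 1, hf =>
      rw [Nat.toDigitsCore]
      rw [Nat.digits_def' (by norm_num : 1 < 10) hn]
      by_cases h : n / 10 = 0
      · simp [h, Nat.digits_zero]
      · have hlt : n / 10 < n := Nat.div_lt_self hn (by norm_num)
        rw [if_neg h, ih (n / 10) hlt (Nat.pos_of_ne_zero h) fuel _ (by omega)]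
        simp

lemma pv_toDigits (m : Nat) (h : 0 < m) :
    Nat.toDigits 10 m = ((Nat.digits 10 m).map Nat.digitChar).reverse := by
  unfold Nat.toDigits
  simpa using pv_core m h (m + 1) [] (Nat.lt_succ_self m)

lemma pv_getD (m : Nat) : ∀ j, (Nat.digits 10 m).getD j 0 = m / 10 ^ j % 10 := by
  induction m using Nat.strong_induction_on with
  | _ m ih =>
    intro j
    rcases Nat.eq_zero_or_pos m with rfl | hm
    · simp
    · rw [Nat.digits_def' (by norm_num : 1 < 10) hm]
      cases j with
      | zero => simp
      | succ j =>
        have := ih (m / 10) (Nat.div_lt_self hm (by norm_num)) j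
        simpa [Nat.div_div_eq_div_mul, pow_succ'] using this

-- A's partial-products list, indexed arithmetically
lemma pv_pp_eq (m : Nat) (num2 : Int) :
    ((PySem.Int.toChars (m : Int)).reverse).map (fun d => pvDigit d * num2)
      = (List.range (PySem.Int.toChars (m : Int)).length).map (fun j => pvDj m j * num2) := by
  have htc : PySem.Int.toChars (m : Int) = Nat.toDigits 10 m := by
    simp [PySem.Int.toChars]
  rw [htc]
  rcases Nat.eq_zero_or_pos m with rfl | hm
  · show List.map (fun d => pvDigit d * num2) (List.reverse ['0'])
        = (List.range (Nat.toDigits 10 0).length).map (fun j => pvDj 0 j * num2)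
    have : (Nat.toDigits 10 0).length = 1 := by decide
    rw [this]
    have h0 : pvDigit '0' = (0:Int) := by decide
    have h1 : pvDj 0 0 = (0:Int) := by decide
    simp [List.range_one, h0, h1]
  · rw [pv_toDigits m hm, List.reverse_reverse, List.map_map]
    have hlen : (((Nat.digits 10 m).map Nat.digitChar).reverse).length = (Nat.digits 10 m).length := by simp
    rw [hlen]
    apply List.ext_getElem
    · simp
    · intro i h1 h2
      simp only [List.getElem_map, List.getElem_range, Function.comp_apply]
      have hi : i < (Nat.digits 10 m).length := by simpa using h1
      have hdlt : (Nat.digits 10 m)[i] < 10 := Nat.digits_lt_base (by norm_num) (List.getElem_mem _)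
      rw [pv_digitChar _ hdlt]
      have : (Nat.digits 10 m)[i] = m / 10 ^ i % 10 := by
        rw [← pv_getD m i, List.getD_eq_getElem _ _ hi]
      rw [this, pvDj]

-- A's accumulator loop equals B's closed-form parts, from index j ≥ 1 on
lemma pv_loop (rd : Bool) (num2 base : Int) (m k : Nat) :
    ∀ (c j : Nat), 1 ≤ j →
      pvLoopA rd (k : Int) ((List.range' j c).map (fun l => pvDj m l * num2)) j
          (((m % 10 ^ j : Nat) : Int) * num2) (base + (j : Int) - 1)
        = (List.range' j c).map (fun i => pvPartB rd num2 base k m i) := by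
  intro c
  induction c with
  | zero => intro j hj; simp [pvLoopA]
  | succ c ih =>
    intro j hj
    rw [List.range'_succ, List.map_cons, List.map_cons]
    show pvLoopA rd (k : Int) _ j _ _ = _
    rw [pvLoopA]
    have hcur : ((m % 10 ^ j : Nat) : Int) * num2 + pvDj m j * num2 * 10 ^ j
        = ((m % 10 ^ (j + 1) : Nat) : Int) * num2 := by
      unfold pvDj
      push_cast [Nat.mod_pow_succ]
      ring
    have hpad : base + (j : Int) - 1 + 1 = base + (j : Int) := by ring
    congr 1
    · unfold pvPartB
      rw [hpad, hcur]
      by_cases h : (j : Int) < (k : Int) - 1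
      · rw [if_pos h, if_pos ⟨hj, h⟩]
        simp [String.append_assoc]
      · rw [if_neg h, if_neg (by tauto)]
        simp
    · have h2 := ih (j + 1) (by omega)
      rw [hpad, hcur]
      push_cast at h2 ⊢
      rw [show base + ((j : Int) + 1) - 1 = base + (j : Int) by ring] at h2
      exact h2

-- ===== VERDICT (by name: the statement is the Claim_ definition above) =====
theorem generate_multiplication_line_spec : Claim_equal_generate_multiplication_line := by
  intro num1 num2 use_cot rd _ hpre
  unfold Spec_generate_multiplication_line
  unfold generate_multiplication_line generate_multiplication_line_alt
  by_cases hc : use_cot = false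
  · simp [hc]
  · simp only [hc]
    obtain ⟨m, rfl⟩ : ∃ m : Nat, num1 = (m : Int) :=
      ⟨num1.toNat, (Int.toNat_of_nonneg (hpre (by revert hc; cases use_cot <;> simp))).symm⟩
    set L := (PySem.Int.toChars (m : Int)).length with hL
    set base : Int := ((PySem.Int.toChars num2).length : Int) with hbase
    have hL1 : 1 ≤ L := by
      have h0 : PySem.Int.toChars (m : Int) ≠ [] := by
        unfold PySem.Int.toChars
        split_ifs
        · simp
        · exact List.ne_nil_of_length_pos Nat.length_toDigits_pos
      have := List.length_pos_of_ne_nil h0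
      omega
    have hB : ∀ i : Nat,
        pvPartBI rd num2 base (L : Int) (m : Int) (i : Int) = pvPartB rd num2 base L m i := by
      intro i
      unfold pvPartBI
      have h1 : ((i : Int)).toNat = i := Int.toNat_natCast i
      have h2 : ((i : Int) + 1).toNat = i + 1 := by omega
      have hfd : PySem.Int.floordiv (m : Int) (10 ^ i) = ((m / 10 ^ i : Nat) : Int) := by
        have := PySem.Int.floordiv_natCast m (10 ^ i)
        push_cast at this ⊢
        exact this
      have hmod : PySem.Int.mod ((m / 10 ^ i : Nat) : Int) 10 = ((m / 10 ^ i % 10 : Nat) : Int) := by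
        have := PySem.Int.mod_natCast (m / 10 ^ i) 10
        push_cast at this ⊢
        exact this
      have hmod2 : PySem.Int.mod (m : Int) (10 ^ (i + 1)) = ((m % 10 ^ (i + 1) : Nat) : Int) := by
        have := PySem.Int.mod_natCast m (10 ^ (i + 1))
        push_cast at this ⊢
        exact this
      rw [h1, h2, hfd, hmod, hmod2]
      unfold pvPartB pvDj
      simp only [Int.natCast_pos]
    rw [show ((L : Int)) = ((L : Nat) : Int) from rfl]
    rw [PySem.List.pyRange_zero_natCast L, List.map_map]
    simp only [Function.comp_def]
    rw [List.map_congr_left (fun i _ => hB i)]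
    rw [pv_pp_eq m num2, ← hL]
    obtain ⟨c, hc'⟩ : ∃ c, L = c + 1 := ⟨L - 1, by omega⟩
    rw [hc', List.range_eq_range', List.range'_succ]
    simp only [List.map_cons, List.length_cons, List.length_map, List.length_range',
      List.headI_cons, List.drop_one, List.tail_cons]
    have hloop := pv_loop rd num2 base m (c + 1) c 1 (le_refl 1)
    rw [show base + ((1 : Nat) : Int) - 1 = base by push_cast; ring] at hloop
    have hcur0 : pvDj m 0 * num2 = ((m % 10 ^ 1 : Nat) : Int) * num2 := by
      unfold pvDj; norm_num
    have hpart0 : pvPartB rd num2 base (c + 1) m 0 = pvFmt rd (pvDj m 0 * num2) base := by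
      unfold pvPartB
      norm_num
    rw [hpart0, show (0 + 1 : Nat) = 1 from rfl, hcur0, hloop]
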